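-- pv_equiv track=rewrite | github.com/TBot709/advent-of-code-2023 | day14/day14-2.py | isCyclingValues
-- ===== SOURCE A (Python) =====
-- def isCyclingValues(l: list) -> bool:
--     n = len(l)
--     for cycle_length in range(1, n):
--         if n % cycle_length == 0:
--             segment = l[:cycle_length]
--             if all(l[i:i+cycle_length] == segment for i in range(cycle_length, n, cycle_length)):
--                 return True
--     return False
-- ===== SOURCE B (Python) =====
-- def isCyclingValues(l: list) -> bool:
--     n = len(l)
--     return any(n % c == 0 and l[c:] == l[:-c] for c in range(1, n))
-- ===== Notes on version B (the rewrite author's own statement) =====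
-- stated objective: simpler
-- what changed: Replaces A's per-divisor inner loop comparing every block slice against the first segment with a single shifted-prefix comparison l[c:] == l[:-c] per candidate period, using the standard periodicity characterisation.
import Mathlib
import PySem

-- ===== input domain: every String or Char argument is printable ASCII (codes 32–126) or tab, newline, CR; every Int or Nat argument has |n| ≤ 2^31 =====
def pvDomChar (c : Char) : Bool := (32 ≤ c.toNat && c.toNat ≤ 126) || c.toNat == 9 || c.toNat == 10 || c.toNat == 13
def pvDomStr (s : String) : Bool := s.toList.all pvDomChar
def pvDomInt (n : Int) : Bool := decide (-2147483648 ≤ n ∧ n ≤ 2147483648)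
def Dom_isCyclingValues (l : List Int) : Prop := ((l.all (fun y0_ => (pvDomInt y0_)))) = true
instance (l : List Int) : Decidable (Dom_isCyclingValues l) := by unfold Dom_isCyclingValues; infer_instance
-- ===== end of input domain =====

-- B replaces A's per-divisor inner loop over block slices with one shifted-prefix
-- comparison l[c:] == l[:-c] per candidate period (same return value; no mutation).

-- ===== PORT A =====
-- the 'for cycle_length in range(1, n)' loop with early 'return True'
def pvALoop (l : List Int) (n : Int) : List Int → Bool
  | [] => false
  | c :: rest =>
      if PySem.Int.mod n c == 0 then
        let segment := PySem.List.slice l none (some c)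
        if (PySem.List.pyRange c n c).all
            (fun i => PySem.List.slice l (some i) (some (i + c)) == segment) then
          true
        else pvALoop l n rest
      else pvALoop l n rest

def isCyclingValues (l : List Int) : Bool :=
  let n : Int := PySem.List.len l
  pvALoop l n (PySem.List.pyRange 1 n 1)

-- ===== PORT B =====
def isCyclingValues_alt (l : List Int) : Bool :=
  let n : Int := PySem.List.len l
  (PySem.List.pyRange 1 n 1).any (fun c =>
    PySem.Int.mod n c == 0 && PySem.List.slice l (some c) none == PySem.List.slice l none (some (-c)))

-- ===== PRECONDITION & SPEC =====
def Spec_isCyclingValues (l : List Int) (out : Bool) : Prop := out = isCyclingValues_alt l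
instance (l : List Int) (out : Bool) : Decidable (Spec_isCyclingValues l out) := by unfold Spec_isCyclingValues; infer_instance

-- ===== CLAIM (what is proved, stated in full; the proofs are below) =====
def Claim_equal_isCyclingValues : Prop := ∀ (l : List Int), Dom_isCyclingValues l → Spec_isCyclingValues l (isCyclingValues l)

-- ===== LEMMAS AND PROOFS =====

-- A's loop with early return is the 'any' of its per-divisor test
theorem pvALoop_eq_any (l : List Int) (n : Int) (cs : List Int) :
    pvALoop l n cs = cs.any (fun c =>
      (PySem.Int.mod n c == 0) &&
      ((PySem.List.pyRange c n c).all
        (fun i => PySem.List.slice l (some i) (some (i + c)) == PySem.List.slice l none (some c)))) := by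
  induction cs with
  | nil => rfl
  | cons c rest ih =>
      simp only [pvALoop, List.any_cons, ih]
      by_cases h1 : PySem.Int.mod n c == 0
      · by_cases h2 : (PySem.List.pyRange c n c).all
            (fun i => PySem.List.slice l (some i) (some (i + c)) == PySem.List.slice l none (some c)) <;>
          simp [h1, h2]
      · simp [h1]

-- any over the same list agrees when the predicates agree on its members
theorem pv_any_congr_mem {α : Type} (l : List α) (f g : α → Bool)
    (h : ∀ x ∈ l, f x = g x) : l.any f = l.any g := by
  induction l with
  | nil => rfl
  | cons a t ih => simp [h a (by simp), ih (fun x hx => h x (by simp [hx]))]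

-- elementwise shift-invariance by m
def pvShift (l : List Int) (m : Nat) : Prop :=
  ∀ i, m + i < l.length → l[m + i]? = l[i]?

theorem pv_shift_block (l : List Int) (m : Nat) (hs : pvShift l m) :
    ∀ q r, r < m → q * m + r < l.length → l[q * m + r]? = l[r]? := by
  intro q
  induction q with
  | zero => intro r _ _; simp
  | succ q ih =>
      intro r hr h
      have e : (q + 1) * m + r = m + (q * m + r) := by ring
      have hlt : q * m + r < l.length := by
        have : q * m ≤ (q + 1) * m := by nlinarith
        omega
      rw [e, hs _ (by omega)]
      exact ih r hr hlt

theorem pv_blocks_iff_shift (l : List Int) (m : Nat) (hm : 0 < m) :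
    (∀ q r, r < m → q * m + r < l.length → 1 ≤ q → l[q * m + r]? = l[r]?)
    ↔ pvShift l m := by
  constructor
  · intro hb i hi
    obtain ⟨q, r, hr, heq, hq1⟩ : ∃ q r, r < m ∧ m * q + r = m + i ∧ 1 ≤ q :=
      ⟨(m + i) / m, (m + i) % m, Nat.mod_lt _ hm, Nat.div_add_mod _ _,
        (Nat.one_le_div_iff hm).mpr (by omega)⟩
    obtain ⟨p, rfl⟩ : ∃ p, q = p + 1 := ⟨q - 1, by omega⟩
    have e1 : m * (p + 1) = m * p + m := by ring
    have e2 : (p + 1) * m = m * p + m := by ring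
    have hA : l[m + i]? = l[r]? := by
      have := hb (p + 1) r hr (by omega) (by omega)
      rw [← this]
      congr 1
      omega
    have hB : l[i]? = l[r]? := by
      cases p with
      | zero =>
          have h0 : m * 0 = 0 := by ring
          have : i = r := by omega
          rw [this]
      | succ p' =>
          have e3 : m * (p' + 1) = m * p' + m := by ring
          have e4 : (p' + 1) * m = m * p' + m := by ring
          have := hb (p' + 1) r hr (by omega) (by omega)
          rw [← this]
          congr 1
          omega
    rw [hA, hB]
  · intro hs q r hr h _
    exact pv_shift_block l m hs q r hr h

theorem pv_dropEq_iff_shift (l : List Int) (m : Nat) :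
    (l.drop m = l.take (l.length - m)) ↔ pvShift l m := by
  constructor
  · intro hd i hi
    have := congrArg (fun t => t[i]?) hd
    simp only [List.getElem?_drop, List.getElem?_take] at this
    rw [if_pos (by omega)] at this
    exact this
  · intro hs
    apply List.ext_getElem?
    intro i
    simp only [List.getElem?_drop, List.getElem?_take]
    by_cases h : i < l.length - m
    · rw [if_pos h]
      exact hs i (by omega)
    · rw [if_neg h]
      exact List.getElem?_eq_none (by omega)

-- each block in l tiles fully when m divides the length
theorem pv_block_fits (l : List Int) (m q : Nat) (hdvd : m ∣ l.length)
    (h : q * m < l.length) : q * m + m ≤ l.length := by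
  rcases hdvd with ⟨k, hk⟩
  have hq : q < k := by nlinarith
  have h2 : (q + 1) * m ≤ m * k := by nlinarith
  have h3 : (q + 1) * m = q * m + m := by ring
  omega

-- the per-divisor tests of A and B agree for every candidate period 1 ≤ c < len l
theorem pv_elem (l : List Int) (c : Int) (h1 : 1 ≤ c) (h2 : c < (l.length : Int)) :
    ((PySem.Int.mod (l.length : Int) c == 0) &&
      ((PySem.List.pyRange c (l.length : Int) c).all
        (fun i => PySem.List.slice l (some i) (some (i + c)) == PySem.List.slice l none (some c))))
    = ((PySem.Int.mod (l.length : Int) c == 0) &&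
       (PySem.List.slice l (some c) none == PySem.List.slice l none (some (-c)))) := by
  obtain ⟨m, rfl⟩ : ∃ m : Nat, c = (m : Int) := ⟨c.toNat, by omega⟩
  have hm1 : 0 < m := by exact_mod_cast h1
  have hmlt : m < l.length := by exact_mod_cast h2
  by_cases hd : PySem.Int.mod (l.length : Int) (m : Int) = 0
  · have hmdvd : m ∣ l.length := by
      have := (PySem.Int.mod_eq_zero_iff_dvd _ _).mp hd
      exact_mod_cast this
    have hdb : (PySem.Int.mod (l.length : Int) (m : Int) == 0) = true := by simpa using hd
    rw [hdb, Bool.true_and, Bool.true_and]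
    rw [PySem.List.slice_from_natCast, PySem.List.slice_to_neg_natCast l m hm1]
    rw [Bool.eq_iff_iff]
    simp only [List.all_eq_true, beq_iff_eq, PySem.List.slice_to_natCast]
    rw [pv_dropEq_iff_shift l m, ← pv_blocks_iff_shift l m hm1]
    constructor
    · intro H q r hr hlt hq1
      have hmem : ((q * m : Nat) : Int) ∈ PySem.List.pyRange (m : Int) (l.length : Int) (m : Int) := by
        rw [PySem.List.mem_pyRange_iff_of_pos (by exact_mod_cast hm1)]
        refine ⟨?_, ?_, ⟨(q : Int) - 1, ?_⟩⟩
        · exact_mod_cast Nat.le_mul_of_pos_left m hq1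
        · exact_mod_cast (show q * m < l.length by omega)
        · push_cast
          ring
      have hb := H _ hmem
      rw [PySem.List.slice_natCast_add] at hb
      have := congrArg (fun t => t[r]?) hb
      simp only [List.getElem?_take, List.getElem?_drop] at this
      rwa [if_pos hr, if_pos hr] at this
    · intro H i hmem
      rw [PySem.List.mem_pyRange_iff_of_pos (by exact_mod_cast hm1)] at hmem
      obtain ⟨hci, hin, t, ht⟩ := hmem
      have h0 : 0 ≤ (m : Int) * t := by omega
      have htnn : 0 ≤ t := by
        by_contra h
        push Not at h
        have := mul_neg_of_pos_of_neg (show (0 : Int) < m by exact_mod_cast hm1) h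
        omega
      have hcast : (((t.toNat + 1) * m : Nat) : Int) = (t + 1) * (m : Int) := by
        push_cast [Int.toNat_of_nonneg htnn]
        ring
      have hieq : i = (((t.toNat + 1) * m : Nat) : Int) := by
        have hr1 : (t + 1) * (m : Int) = (m : Int) * t + (m : Int) := by ring
        omega
      have hqm_lt : (t.toNat + 1) * m < l.length := by
        have : i < (l.length : Int) := hin
        rw [hieq] at this
        exact_mod_cast this
      have hfit := pv_block_fits l m (t.toNat + 1) hmdvd hqm_lt
      rw [hieq, PySem.List.slice_natCast_add]
      apply List.ext_getElem?
      intro r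
      simp only [List.getElem?_take, List.getElem?_drop]
      by_cases hr : r < m
      · rw [if_pos hr, if_pos hr]
        exact H (t.toNat + 1) r hr (by omega) (by omega)
      · rw [if_neg hr, if_neg hr]
  · have hdb : (PySem.Int.mod (l.length : Int) (m : Int) == 0) = false := by simpa using hd
    rw [hdb]
    simp

theorem pv_main (l : List Int) : isCyclingValues l = isCyclingValues_alt l := by
  unfold isCyclingValues isCyclingValues_alt
  simp only [PySem.List.len_eq]
  rw [pvALoop_eq_any]
  apply pv_any_congr_mem
  intro c hc
  rw [PySem.List.mem_pyRange_one] at hc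
  exact pv_elem l c hc.1 hc.2

-- ===== VERDICT (by name: the statement is the Claim_ definition above) =====
theorem isCyclingValues_spec : Claim_equal_isCyclingValues := by
  intro l _
  unfold Spec_isCyclingValues
  exact pv_main l
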